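-- pv_equiv track=rewrite | github.com/drgnfrts/IS111 | practice_papers/21LT1/q2b.py | get_all_third_digits
-- ===== SOURCE A (Python) =====
-- def get_all_third_digits(str_list):
--     third_digit_list = []
--     for string in str_list:
--         digit_count = 0
--         for ch in string:
--             if ch.isdigit():
--                 digit_count += 1
--                 if digit_count == 3:
--                     third_digit_list.append(int(ch))
--                     break
--     return third_digit_list
-- ===== SOURCE B (Python) =====
-- def get_all_third_digits(str_list):
--     out = []
--     for s in str_list:
--         digits = [ch for ch in s if ch.isdigit()]
--         if len(digits) >= 3:
--             out.append(int(digits[2]))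
--     return out
-- ===== Notes on version B (the rewrite author's own statement) =====
-- stated objective: simpler
-- what changed: Replaces the explicit digit counter and inner early-break with a filter of each string's digit characters followed by a length test and positional selection of the third one.
import Mathlib
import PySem

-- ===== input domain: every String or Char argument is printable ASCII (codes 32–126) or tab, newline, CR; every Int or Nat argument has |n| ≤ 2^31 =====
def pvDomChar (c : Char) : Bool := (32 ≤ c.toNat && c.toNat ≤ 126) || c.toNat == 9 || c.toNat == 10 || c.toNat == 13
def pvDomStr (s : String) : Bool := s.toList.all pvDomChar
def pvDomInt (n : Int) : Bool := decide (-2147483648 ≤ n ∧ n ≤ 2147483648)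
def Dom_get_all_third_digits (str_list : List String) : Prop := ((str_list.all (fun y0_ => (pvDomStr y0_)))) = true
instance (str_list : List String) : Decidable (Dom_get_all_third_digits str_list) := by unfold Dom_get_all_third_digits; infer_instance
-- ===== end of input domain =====

-- B replaces A's digit counter and early inner break by filtering each string's
-- digit characters and selecting the third by position (objective: simpler).

-- ===== PORT A =====
-- inner 'for ch in string' loop with the digit counter; returns the appended value, if any.
-- int(ch) for a ch with ch.isdigit(): ported as (PySem.Int.ofChars? [ch]).getD 0 — exact
-- whenever int(ch) returns (on ASCII isdigit chars '0'-'9' it always does).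
def pvAInner : List Char → Int → Option Int
  | [], _ => none
  | c :: rest, cnt =>
    if PySem.Chars.isdigit c then
      if cnt + 1 == 3 then some ((PySem.Int.ofChars? [c]).getD 0)
      else pvAInner rest (cnt + 1)
    else pvAInner rest cnt

def get_all_third_digits (str_list : List String) : List Int :=
  str_list.foldl (fun acc s =>
    match pvAInner s.toList 0 with
    | some v => acc ++ [v]
    | none => acc) []

-- ===== PORT B =====
def get_all_third_digits_alt (str_list : List String) : List Int :=
  str_list.filterMap (fun s =>
    let d := s.toList.filter PySem.Chars.isdigit
    if 3 ≤ d.length then some ((PySem.Int.ofChars? [d.getD 2 '0']).getD 0) else none)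

-- ===== PRECONDITION & SPEC =====
def Spec_get_all_third_digits (str_list : List String) (out : List Int) : Prop := out = get_all_third_digits_alt str_list
instance (str_list : List String) (out : List Int) : Decidable (Spec_get_all_third_digits str_list out) := by unfold Spec_get_all_third_digits; infer_instance

-- ===== CLAIM (what is proved, stated in full; the proofs are below) =====
def Claim_equal_get_all_third_digits : Prop := ∀ (str_list : List String), Dom_get_all_third_digits str_list → Spec_get_all_third_digits str_list (get_all_third_digits str_list)

-- ===== LEMMAS AND PROOFS =====

-- ===== VERDICT (by name: the statement is the Claim_ definition above) =====
-- inner loop = positional selection of the third digit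
theorem pvAInner_eq (cs : List Char) : ∀ (k : Nat), k ≤ 2 →
    pvAInner cs (k : Int) =
      match (cs.filter PySem.Chars.isdigit).drop (2 - k) with
      | c :: _ => some ((PySem.Int.ofChars? [c]).getD 0)
      | [] => none := by
  induction cs with
  | nil => intro k _; simp [pvAInner]
  | cons c rest ih =>
    intro k hk
    by_cases hd : PySem.Chars.isdigit c
    · by_cases h3 : k = 2
      · subst h3; simp [pvAInner, hd]
      · have hk1 : k + 1 ≤ 2 := by omega
        have hne : ((k : Int) + 1 == 3) = false := by
          simp; omega
        have hcast : (k : Int) + 1 = ((k + 1 : Nat) : Int) := by push_cast; ring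
        have : pvAInner (c :: rest) (k : Int) = pvAInner rest ((k + 1 : Nat) : Int) := by
          simp only [pvAInner, hd, hne, if_true, if_false, Bool.false_eq_true, ite_false, ite_true]
          rw [hcast]
        rw [this, ih (k + 1) hk1]
        have hdrop : (2 - k : Nat) = (2 - (k + 1)) + 1 := by omega
        simp [hd, hdrop]
    · simp [pvAInner, hd, ih k hk]

theorem foldl_app_filterMap (f : String → Option Int) (l : List String) :
    ∀ acc, l.foldl (fun acc s => match f s with | some v => acc ++ [v] | none => acc) acc
      = acc ++ l.filterMap f := by
  induction l with
  | nil => simp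
  | cons s rest ih =>
    intro acc
    cases h : f s <;> simp [h, ih]

theorem per_string (s : String) :
    pvAInner s.toList 0 =
      (let d := s.toList.filter PySem.Chars.isdigit
       if 3 ≤ d.length then some ((PySem.Int.ofChars? [d.getD 2 '0']).getD 0) else none) := by
  have h := pvAInner_eq s.toList 0 (by omega)
  simp only [Nat.cast_zero] at h
  rw [h]
  cases hD : (s.toList.filter PySem.Chars.isdigit).drop 2 with
  | nil =>
    have : (s.toList.filter PySem.Chars.isdigit).length ≤ 2 := by
      have := List.drop_eq_nil_iff.mp hD; omega
    simp_all; omega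
  | cons c rest =>
    have hlen : 3 ≤ (s.toList.filter PySem.Chars.isdigit).length := by
      by_contra hlt
      have : (s.toList.filter PySem.Chars.isdigit).drop 2 = [] :=
        List.drop_eq_nil_iff.mpr (by omega)
      simp [this] at hD
    have h2 : 2 < (s.toList.filter PySem.Chars.isdigit).length := by omega
    have hget : (s.toList.filter PySem.Chars.isdigit)[2]? = some c := by
      rw [List.getElem?_eq_getElem h2]
      have hh : ((s.toList.filter PySem.Chars.isdigit).drop 2)[0]'(by simp [hD]) = c := by
        simp [hD]
      rw [List.getElem_drop] at hh
      simpa using hh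
    simp [hlen, hget]

theorem get_all_third_digits_spec : Claim_equal_get_all_third_digits := by
  intro str_list _
  unfold Spec_get_all_third_digits get_all_third_digits get_all_third_digits_alt
  rw [foldl_app_filterMap]
  simp only [List.nil_append]
  congr 1
  funext s
  exact per_string s
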